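-- pv_equiv track=rewrite | github.com/sosacrazy126/MindSearch-Analysis | mindsearch/agent/safe_execution.py | _find_cyclic_pattern
-- ===== SOURCE A (Python) =====
-- from typing import Dict, Any, Optional, List, Set
--
-- def _find_cyclic_pattern(nodes: List[str], min_cycle_length: int = 2) -> Optional[List[str]]:
--     """Find cyclic patterns in node visits."""
--     if len(nodes) < min_cycle_length * 2:
--         return None
--
--     # Check for patterns of different lengths
--     for cycle_length in range(min_cycle_length, len(nodes) // 2 + 1):
--         for start in range(len(nodes) - cycle_length * 2 + 1):
--             pattern = nodes[start:start + cycle_length]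
--             next_pattern = nodes[start + cycle_length:start + cycle_length * 2]
--
--             if pattern == next_pattern:
--                 return pattern
--
--     return None
-- ===== SOURCE B (Python) =====
-- def _find_cyclic_pattern(nodes, min_cycle_length=2):
--     """Sliding-window re-implementation: per length L, keep a running count of
--     the positions i in the current window with nodes[i] == nodes[i + L]."""
--     n = len(nodes)
--     if n < min_cycle_length * 2:
--         return None
--     if min_cycle_length <= 0:
--         # a pattern of non-positive length is empty and trivially repeats
--         return []
--     for L in range(min_cycle_length, n // 2 + 1):
--         cnt = sum(1 for i in range(L) if nodes[i] == nodes[i + L])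
--         for s in range(n - 2 * L + 1):
--             if cnt == L:
--                 return nodes[s:s + L]
--             if s + 2 * L < n:
--                 cnt += (nodes[s + L] == nodes[s + 2 * L]) - (nodes[s] == nodes[s + L])
--     return None
-- ===== Notes on version B (the rewrite author's own statement) =====
-- stated objective: alternative
-- what changed: Instead of rebuilding and comparing two length-L slices for every (length, start) pair, B keeps a sliding count of positions i in the current window with nodes[i] == nodes[i+L], updated in O(1) per start, and returns the slice only when the count reaches L.
import Mathlib
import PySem

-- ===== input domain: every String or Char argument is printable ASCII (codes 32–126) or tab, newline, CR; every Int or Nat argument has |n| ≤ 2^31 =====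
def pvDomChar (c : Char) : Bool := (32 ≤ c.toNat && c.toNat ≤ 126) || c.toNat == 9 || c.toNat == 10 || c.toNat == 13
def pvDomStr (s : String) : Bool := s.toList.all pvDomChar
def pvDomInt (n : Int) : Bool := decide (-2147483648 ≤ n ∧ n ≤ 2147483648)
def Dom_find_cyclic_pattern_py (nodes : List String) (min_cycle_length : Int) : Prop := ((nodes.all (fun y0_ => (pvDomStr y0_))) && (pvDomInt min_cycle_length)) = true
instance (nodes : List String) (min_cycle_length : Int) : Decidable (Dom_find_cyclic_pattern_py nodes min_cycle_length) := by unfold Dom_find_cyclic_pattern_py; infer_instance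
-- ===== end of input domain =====

-- B replaces A's per-(length,start) slice comparison by a sliding count of matching positions in the current window, updated by one O(1) step per start (objective: alternative algorithm).

-- ===== PORT A =====
def find_cyclic_pattern_py (nodes : List String) (min_cycle_length : Int) : Option (List String) :=
  if (nodes.length : Int) < min_cycle_length * 2 then
    none
  else
    (PySem.List.pyRange min_cycle_length (PySem.Int.floordiv (nodes.length : Int) 2 + 1) 1).findSome?
      (fun cycle_length =>
        (PySem.List.pyRange 0 ((nodes.length : Int) - cycle_length * 2 + 1) 1).findSome?
          (fun start =>
            let pattern := PySem.List.slice nodes (some start) (some (start + cycle_length))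
            let next_pattern := PySem.List.slice nodes (some (start + cycle_length)) (some (start + cycle_length * 2))
            if pattern = next_pattern then some pattern else none))

-- ===== PORT B =====
-- inner loop of Source B: walk the starts carrying cnt = number of positions i in [s, s+L) with nodes[i] == nodes[i+L]
def bInnerLoop (nodes : List String) (n L : Int) : List Int → Int → Option (List String)
  | [], _ => none
  | s :: rest, cnt =>
    if cnt = L then some (PySem.List.slice nodes (some s) (some (s + L)))
    else bInnerLoop nodes n L rest
      (if s + 2 * L < n then
        cnt + ((if PySem.List.pyGet? nodes (s + L) == PySem.List.pyGet? nodes (s + 2 * L) then 1 else 0)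
             - (if PySem.List.pyGet? nodes s == PySem.List.pyGet? nodes (s + L) then 1 else 0))
       else cnt)

def find_cyclic_pattern_py_alt (nodes : List String) (min_cycle_length : Int) : Option (List String) :=
  let n : Int := nodes.length
  if n < min_cycle_length * 2 then none
  else if min_cycle_length ≤ 0 then some []
  else
    (PySem.List.pyRange min_cycle_length (PySem.Int.floordiv n 2 + 1) 1).findSome?
      (fun L =>
        let cnt0 := (PySem.List.pyRange 0 L 1).foldl
          (fun c i => if PySem.List.pyGet? nodes i == PySem.List.pyGet? nodes (i + L) then c + 1 else c) 0
        bInnerLoop nodes n L (PySem.List.pyRange 0 (n - 2 * L + 1) 1) cnt0)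

-- ===== PRECONDITION & SPEC =====
def Spec_find_cyclic_pattern_py (nodes : List String) (min_cycle_length : Int) (out : Option (List String)) : Prop := out = find_cyclic_pattern_py_alt nodes min_cycle_length
instance (nodes : List String) (min_cycle_length : Int) (out : Option (List String)) : Decidable (Spec_find_cyclic_pattern_py nodes min_cycle_length out) := by unfold Spec_find_cyclic_pattern_py; infer_instance

-- ===== CLAIM (what is proved, stated in full; the proofs are below) =====
def Claim_equal_find_cyclic_pattern_py : Prop := ∀ (nodes : List String) (min_cycle_length : Int), Dom_find_cyclic_pattern_py nodes min_cycle_length → Spec_find_cyclic_pattern_py nodes min_cycle_length (find_cyclic_pattern_py nodes min_cycle_length)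

-- ===== LEMMAS AND PROOFS =====

theorem findSome?_congr {α β : Type} (f g : α → Option β) (l : List α)
    (h : ∀ x ∈ l, f x = g x) : l.findSome? f = l.findSome? g := by
  induction l with
  | nil => rfl
  | cons x xs ih =>
    simp only [List.findSome?_cons, h x (by simp)]
    cases g x with
    | none => exact ih (fun y hy => h y (by simp [hy]))
    | some v => rfl

theorem clampIdx_cast (n : Nat) (i : Int) :
    (PySem.List.clampIdx n i : Int) = if i < 0 then max 0 ((n : Int) + i) else min i n := by
  unfold PySem.List.clampIdx
  split_ifs <;> omega

theorem slice_empty_iff {α : Type} (xs : List α) (a b : Int) :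
    PySem.List.slice xs (some a) (some b) = [] ↔
      PySem.List.clampIdx xs.length b ≤ PySem.List.clampIdx xs.length a := by
  rw [← List.length_eq_zero_iff, PySem.List.length_slice]
  omega

theorem take_drop_eq_iff {α : Type} (xs : List α) (a k : Nat) :
    ((xs.drop a).take k = (xs.drop (a + k)).take k) ↔
      ∀ j < k, xs[a + j]? = xs[a + k + j]? := by
  constructor
  · intro he j hj
    have := congrArg (fun l => l[j]?) he
    simpa [List.getElem?_drop, hj] using this
  · intro hp
    apply List.ext_getElem?
    intro i
    by_cases hi : i < k
    · simpa [List.getElem?_drop, hi] using hp i hi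
    · simp [hi]

theorem pyGet?_of_nonneg {α : Type} (xs : List α) (i : Int) (h : 0 ≤ i) :
    PySem.List.pyGet? xs i = xs[i.toNat]? := by
  have := PySem.List.pyGet?_natCast xs i.toNat
  rwa [Int.toNat_of_nonneg h] at this

-- match indicator and window count for B's sliding window
def Mx (nodes : List String) (L t : Int) : Bool :=
  PySem.List.pyGet? nodes t == PySem.List.pyGet? nodes (t + L)

def W (nodes : List String) (L s : Int) : Int :=
  ((List.range L.toNat).countP (fun (j : Nat) => Mx nodes L (s + (j : Int))) : Int)

theorem W_eq_L_iff (nodes : List String) (L s : Int) (hL : 0 ≤ L) :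
    W nodes L s = L ↔ ∀ j < L.toNat, Mx nodes L (s + (j : Int)) = true := by
  unfold W
  have key := List.countP_eq_length (l := List.range L.toNat) (p := fun (j : Nat) => Mx nodes L (s + (j : Int)))
  rw [List.length_range] at key
  simp only [List.mem_range] at key
  constructor
  · intro h j hj
    exact key.1 (by omega) j hj
  · intro h
    have := key.2 h
    omega

theorem W_succ (nodes : List String) (L s : Int) (hL : 0 ≤ L) :
    W nodes L (s + 1) = W nodes L s
      + (if Mx nodes L (s + L) then 1 else 0) - (if Mx nodes L s then 1 else 0) := by
  unfold W
  have h1 : (List.range (L.toNat + 1)).countP (fun (j : Nat) => Mx nodes L (s + (j : Int)))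
      = (List.range L.toNat).countP (fun (j : Nat) => Mx nodes L (s + (j : Int)))
        + (if Mx nodes L (s + L.toNat) then 1 else 0) := by
    rw [List.range_succ, List.countP_append]
    simp [List.countP_cons]
  have h2 : (List.range (L.toNat + 1)).countP (fun (j : Nat) => Mx nodes L (s + (j : Int)))
      = (if Mx nodes L s then 1 else 0)
        + (List.range L.toNat).countP (fun (j : Nat) => Mx nodes L (s + 1 + (j : Int))) := by
    rw [List.range_succ_eq_map, List.countP_cons, List.countP_map]
    have : ∀ j : Nat, Mx nodes L (s + (j + 1 : Nat)) = Mx nodes L (s + 1 + j) := by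
      intro j; congr 1; push_cast; ring
    simp only [Function.comp_def, this]
    simp [add_comm]
  have hcast : ((L.toNat : Int)) = L := Int.toNat_of_nonneg hL
  rw [hcast] at h1
  split_ifs at h1 h2 ⊢ <;> omega

theorem sliceeq_iff_W (nodes : List String) (L s : Int) (hL : 1 ≤ L)
    (h0 : 0 ≤ s) :
    (PySem.List.slice nodes (some s) (some (s + L)) =
      PySem.List.slice nodes (some (s + L)) (some (s + L * 2))) ↔ W nodes L s = L := by
  have hL0 : (0:Int) ≤ L := by omega
  have t0 : (s + L).toNat = s.toNat + L.toNat := by omega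
  have t1 : (s + L * 2).toNat = s.toNat + L.toNat + L.toNat := by omega
  have e1 : PySem.List.slice nodes (some s) (some (s + L))
      = (nodes.drop s.toNat).take L.toNat := by
    rw [PySem.List.slice_toNat nodes h0 (by omega), t0]
    congr 1
    omega
  have e2 : PySem.List.slice nodes (some (s + L)) (some (s + L * 2))
      = (nodes.drop (s.toNat + L.toNat)).take L.toNat := by
    rw [PySem.List.slice_toNat nodes (by omega) (by omega), t0, t1]
    congr 1
    omega
  rw [e1, e2, take_drop_eq_iff nodes s.toNat L.toNat,
      W_eq_L_iff nodes L s hL0]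
  constructor
  · intro h j hj
    have hg1 : PySem.List.pyGet? nodes (s + j) = nodes[s.toNat + j]? := by
      rw [pyGet?_of_nonneg nodes _ (by omega)]; congr 1; omega
    have hg2 : PySem.List.pyGet? nodes (s + j + L) = nodes[s.toNat + L.toNat + j]? := by
      rw [pyGet?_of_nonneg nodes _ (by omega)]; congr 1; omega
    unfold Mx
    rw [hg1, hg2, h j hj]
    simp
  · intro h j hj
    have hm := h j hj
    unfold Mx at hm
    rw [pyGet?_of_nonneg nodes _ (by omega), pyGet?_of_nonneg nodes _ (by omega)] at hm
    rw [beq_iff_eq] at hm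
    have : (s + j).toNat = s.toNat + j := by omega
    rw [this] at hm
    have : (s + j + L).toNat = s.toNat + L.toNat + j := by omega
    rw [this] at hm
    exact hm

-- the inner loops agree, given cnt is the true window count
theorem inner_eq (nodes : List String) (L : Int) (hL : 1 ≤ L) :
    ∀ (fuel : Nat) (s : Int), 0 ≤ s →
      fuel = ((nodes.length : Int) - 2 * L + 1 - s).toNat →
      ∀ cnt, cnt = W nodes L s →
      (PySem.List.pyRange s ((nodes.length : Int) - 2 * L + 1) 1).findSome?
        (fun start =>
          let pattern := PySem.List.slice nodes (some start) (some (start + L))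
          let next_pattern := PySem.List.slice nodes (some (start + L)) (some (start + L * 2))
          if pattern = next_pattern then some pattern else none)
      = bInnerLoop nodes (nodes.length : Int) L
          (PySem.List.pyRange s ((nodes.length : Int) - 2 * L + 1) 1) cnt := by
  intro fuel
  induction fuel with
  | zero =>
    intro s hs hf cnt hcnt
    rw [PySem.List.pyRange_one_eq_nil (by omega)]
    rfl
  | succ m ih =>
    intro s hs hf cnt hcnt
    set n : Int := (nodes.length : Int) with hn
    have hslt : s < n - 2 * L + 1 := by omega
    rw [PySem.List.pyRange_one_cons hslt]
    rw [List.findSome?_cons]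
    rw [bInnerLoop]
    by_cases hm : (PySem.List.slice nodes (some s) (some (s + L)) =
        PySem.List.slice nodes (some (s + L)) (some (s + L * 2)))
    · have hw : cnt = L := by
        rw [hcnt]; exact (sliceeq_iff_W nodes L s hL hs).1 hm
      simp only [hm, if_pos hw]
      simp
    · have hw : ¬ (cnt = L) := by
        rw [hcnt]
        intro hc
        exact hm ((sliceeq_iff_W nodes L s hL hs).2 hc)
      simp only [if_neg hm, if_neg hw]
      by_cases hlast : s + 2 * L < n
      · apply ih (s + 1) (by omega) (by omega)
        rw [if_pos hlast, hcnt, W_succ nodes L s (by omega)]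
        unfold Mx
        have : s + L + L = s + 2 * L := by ring
        rw [this]
        ring
      · have hend : n - 2 * L + 1 = s + 1 := by omega
        rw [hend, PySem.List.pyRange_one_eq_nil (by omega)]
        rfl

-- B's initial count is the window count at 0
theorem init_eq (nodes : List String) (L : Int) :
    (PySem.List.pyRange 0 L 1).foldl
      (fun c i => if PySem.List.pyGet? nodes i == PySem.List.pyGet? nodes (i + L) then c + 1 else c)
      0 = W nodes L 0 := by
  rw [PySem.List.foldl_count_if, PySem.List.pyRange_one, List.countP_map]
  unfold W Mx
  simp [Function.comp_def]

-- A finds the empty pattern immediately when min_cycle_length ≤ 0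
theorem innerA_nonpos (nodes : List String) (L : Int) (hL : L ≤ 0) :
    (PySem.List.pyRange 0 ((nodes.length : Int) - L * 2 + 1) 1).findSome?
      (fun start =>
        let pattern := PySem.List.slice nodes (some start) (some (start + L))
        let next_pattern := PySem.List.slice nodes (some (start + L)) (some (start + L * 2))
        if pattern = next_pattern then some pattern else none)
    = some [] := by
  set n : Int := (nodes.length : Int) with hn
  have hn0 : 0 ≤ n := by positivity
  set sStar : Int := if n + L ≤ 0 then 0 else -(2 * L) with hsS
  have hs0 : 0 ≤ sStar := by rw [hsS]; split_ifs <;> omega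
  have hsR : sStar < n - L * 2 + 1 := by rw [hsS]; split_ifs <;> omega
  rw [PySem.List.pyRange_one_append 0 sStar (n - L * 2 + 1) hs0 (by omega),
      List.findSome?_append]
  have hpre : (PySem.List.pyRange 0 sStar 1).findSome?
      (fun start =>
        let pattern := PySem.List.slice nodes (some start) (some (start + L))
        let next_pattern := PySem.List.slice nodes (some (start + L)) (some (start + L * 2))
        if pattern = next_pattern then some pattern else none) = none := by
    rw [List.findSome?_eq_none_iff]
    intro s hsmem
    rw [PySem.List.mem_pyRange_one] at hsmem
    obtain ⟨hs1, hs2⟩ := hsmem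
    have hnl : ¬ (n + L ≤ 0) := by
      by_contra hc
      rw [hsS, if_pos hc] at hs2; omega
    rw [hsS, if_neg hnl] at hs2
    -- lengths of the two slices, via clampIdx
    have c1 := clampIdx_cast nodes.length s
    have c2 := clampIdx_cast nodes.length (s + L)
    have c3 := clampIdx_cast nodes.length (s + L * 2)
    rw [← hn] at c1 c2 c3
    have l1 := PySem.List.length_slice nodes s (s + L)
    have l2 := PySem.List.length_slice nodes (s + L) (s + L * 2)
    simp only []
    rw [if_neg]
    intro he
    have := congrArg List.length he
    rw [l1, l2] at this
    -- pattern and next_pattern have different lengths on [0, sStar)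
    split_ifs at c1 c2 c3 <;> omega
  rw [hpre, Option.none_or]
  rw [PySem.List.pyRange_one_cons hsR, List.findSome?_cons]
  have hpat : PySem.List.slice nodes (some sStar) (some (sStar + L)) = [] := by
    rw [slice_empty_iff]
    have c1 := clampIdx_cast nodes.length sStar
    have c2 := clampIdx_cast nodes.length (sStar + L)
    rw [← hn] at c1 c2
    rw [hsS] at c1 c2 ⊢
    split_ifs at c1 c2 ⊢ <;> omega
  have hnext : PySem.List.slice nodes (some (sStar + L)) (some (sStar + L * 2)) = [] := by
    rw [slice_empty_iff]
    have c2 := clampIdx_cast nodes.length (sStar + L)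
    have c3 := clampIdx_cast nodes.length (sStar + L * 2)
    rw [← hn] at c2 c3
    rw [hsS] at c2 c3 ⊢
    split_ifs at c2 c3 ⊢ <;> omega
  simp only [hpat, hnext]
  simp

-- ===== VERDICT (by name: the statement is the Claim_ definition above) =====
theorem find_cyclic_pattern_py_spec : Claim_equal_find_cyclic_pattern_py := by
  intro nodes min_cycle_length _
  unfold Spec_find_cyclic_pattern_py
  unfold find_cyclic_pattern_py find_cyclic_pattern_py_alt
  simp only []
  set n : Int := (nodes.length : Int) with hn
  have hn0 : 0 ≤ n := by positivity
  by_cases hg : n < min_cycle_length * 2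
  · rw [if_pos hg, if_pos hg]
  · rw [if_neg hg, if_neg hg]
    by_cases hmp : min_cycle_length ≤ 0
    · rw [if_pos hmp]
      have hfd : (0:Int) ≤ PySem.Int.floordiv n 2 := by
        rw [PySem.Int.floordiv_eq_ediv_of_pos (by omega)]
        omega
      rw [PySem.List.pyRange_one_cons (by omega), List.findSome?_cons]
      rw [innerA_nonpos nodes min_cycle_length hmp]
    · rw [if_neg hmp]
      apply findSome?_congr
      intro L hLmem
      rw [PySem.List.mem_pyRange_one] at hLmem
      obtain ⟨hL1, hL2⟩ := hLmem
      have hL : 1 ≤ L := by omega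
      have h2L : 2 * L ≤ n := by
        have := (PySem.Int.le_floordiv_iff_mul_le (a := n) (b := 2) (q := L) (by omega)).1 (by omega)
        omega
      have hrange : n - L * 2 + 1 = n - 2 * L + 1 := by ring
      rw [hrange]
      exact inner_eq nodes L hL ((n - 2 * L + 1 - 0).toNat) 0 le_rfl
        (by omega) _ (init_eq nodes L)
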